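-- pv_equiv track=rewrite | github.com/Manojcs12/PythonProblem | Daily_practice/rolling_unique_users.py | rolling_unique_users
-- ===== SOURCE A (Python) =====
-- from collections import defaultdict
--
-- def rolling_unique_users(events: list[dict], window: int) -> dict[int, int]:
--     if not events:
--         return {}
--
--     # Step 1: Sort events by timestamp
--     events.sort(key=lambda x: x["timestamp"])
--
--     # Sliding window pointers
--     left = 0
--
--     # Tracks counts of users currently in the window
--     user_count = defaultdict(int)
--
--     result = {}
--
--     # Helper: get window start time for a given T
--     def window_start(T):
--         return T - window + 1
--
--     # Step 2: Iterate through sorted events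
--     i = 0
--     n = len(events)
--
--     while i < n:
--         current_ts = events[i]["timestamp"]
--
--         # Process all events that occur at this timestamp
--         while i < n and events[i]["timestamp"] == current_ts:
--             user = events[i]["user"]
--             user_count[user] += 1
--             i += 1
--
--         # Step 3: Slide left pointer to remove old events
--         start_limit = window_start(current_ts)
--
--         while left < n and events[left]["timestamp"] < start_limit:
--             old_user = events[left]["user"]
--             user_count[old_user] -= 1
--             if user_count[old_user] == 0:
--                 del user_count[old_user]
--             left += 1
--
--         # Step 4: Record number of unique users at this timestamp
--         result[current_ts] = len(user_count)
--
--     return result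
-- ===== SOURCE B (Python) =====
-- def rolling_unique_users(events: list[dict], window: int) -> dict[int, int]:
--     if not events:
--         return {}
--     events.sort(key=lambda x: x["timestamp"])
--     return {
--         T: len({e["user"] for e in events
--                 if T - window + 1 <= e["timestamp"] <= T})
--         for T in dict.fromkeys(e["timestamp"] for e in events)
--     }
-- ===== Notes on version B (the rewrite author's own statement) =====
-- stated objective: simpler
-- what changed: A's incremental sliding-window pass (two pointers plus a mutable user-count dict with increment/decrement/delete bookkeeping) is replaced by a direct per-distinct-timestamp recomputation: for each distinct timestamp T, count the set of users of events with timestamp in [T-window+1, T].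
-- intended difference: On negative windows where two event timestamps t1 < t2 satisfy t2 <= t1 - window, A's left pointer slides past not-yet-processed events and its leftover count-dict entries make it report positive user counts for the empty window [T-window+1, T] (e.g. {0: 1, 1: 1}); B reports the actual count of that window (0), which is the intended value. — e.g. on rolling_unique_users([[("timestamp", 0), ("user", 1)], [("timestamp", 1), ("user", 2)]], -1): A returns [(0, 1), (1, 1)], B returns [(0, 0), (1, 0)]
import Mathlib
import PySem

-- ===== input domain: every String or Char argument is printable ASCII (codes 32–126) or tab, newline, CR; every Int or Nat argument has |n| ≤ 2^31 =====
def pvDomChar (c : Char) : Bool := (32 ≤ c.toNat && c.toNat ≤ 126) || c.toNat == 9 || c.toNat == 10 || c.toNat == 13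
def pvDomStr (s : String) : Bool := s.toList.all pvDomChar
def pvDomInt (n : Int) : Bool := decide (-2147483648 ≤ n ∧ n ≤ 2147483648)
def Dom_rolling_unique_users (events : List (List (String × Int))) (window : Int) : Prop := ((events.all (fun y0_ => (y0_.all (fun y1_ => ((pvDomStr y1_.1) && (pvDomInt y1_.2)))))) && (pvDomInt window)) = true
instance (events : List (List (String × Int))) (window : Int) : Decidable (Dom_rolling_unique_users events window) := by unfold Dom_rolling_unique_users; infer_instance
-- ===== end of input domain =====

-- B replaces A's incremental sliding-window maintenance by an independent per-distinct-timestamp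
-- recomputation (objective: simpler). Both Pythons sort `events` in place; the equivalence proved
-- here is about the RETURN value (B performs the same in-place sort as A).

-- ===== PORT A =====
-- e["timestamp"] / e["user"]: first-match association-list lookup (Pre_ guarantees the key is present)
def pvTs (e : List (String × Int)) : Int := (PySem.Dict.mk e).getD "timestamp" 0

def pvUser (e : List (String × Int)) : Int := (PySem.Dict.mk e).getD "user" 0

-- inner `while i < n and events[i]["timestamp"] == current_ts` loop (fuel = n - i at call site)
def rollGroup (s : List (List (String × Int))) (T : Int) :
    Nat → Nat → PySem.Dict Int Int → Nat × PySem.Dict Int Int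
  | 0, i, uc => (i, uc)
  | fuel + 1, i, uc =>
    match s[i]? with
    | some e =>
        if pvTs e = T then
          rollGroup s T fuel (i + 1) (uc.modify (pvUser e) 0 (· + 1))
        else (i, uc)
    | none => (i, uc)

-- `while left < n and events[left]["timestamp"] < start_limit` loop (fuel = n - left at call site)
def rollSlide (s : List (List (String × Int))) (lim : Int) :
    Nat → Nat → PySem.Dict Int Int → Nat × PySem.Dict Int Int
  | 0, l, uc => (l, uc)
  | fuel + 1, l, uc =>
    match s[l]? with
    | some e =>
        if pvTs e < lim then
          let u := pvUser e
          let uc1 := uc.modify u 0 (· - 1)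
          let uc2 := if uc1.getD u 0 = 0 then uc1.erase u else uc1
          rollSlide s lim fuel (l + 1) uc2
        else (l, uc)
    | none => (l, uc)

-- outer `while i < n` loop (fuel = n at call site; each iteration advances i by at least 1)
def rollMain (s : List (List (String × Int))) (window : Int) :
    Nat → Nat → Nat → PySem.Dict Int Int → PySem.Dict Int Int → PySem.Dict Int Int
  | 0, _, _, _, res => res
  | fuel + 1, i, left, uc, res =>
    match s[i]? with
    | some e =>
        let T := pvTs e
        let g := rollGroup s T (s.length - i) i uc
        let sl := rollSlide s (T - window + 1) (s.length - left) left g.2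
        rollMain s window fuel g.1 sl.1 sl.2 (res.insert T (sl.2.size : Int))
    | none => res

def rolling_unique_users (events : List (List (String × Int))) (window : Int) : List (Int × Int) :=
  if events = [] then []
  else
    let s := PySem.List.sorted events (fun e => pvTs e)
    (rollMain s window s.length 0 0 PySem.Dict.empty PySem.Dict.empty).items

-- ===== PORT B =====
def rolling_unique_users_alt (events : List (List (String × Int))) (window : Int) : List (Int × Int) :=
  if events = [] then []
  else
    let s := PySem.List.sorted events (fun e => pvTs e)
    (PySem.List.dedup (s.map pvTs)).map (fun T =>
      (T, ((PySem.Set.ofList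
              ((s.filter (fun e => decide (T - window + 1 ≤ pvTs e) && decide (pvTs e ≤ T))).map
                pvUser)).length : Int)))

-- ===== PRECONDITION & SPEC =====
-- Pre_ excludes exactly the events missing the "timestamp" or "user" key, on which A raises KeyError.
def Pre_rolling_unique_users (events : List (List (String × Int))) (window : Int) : Prop :=
  ∀ e ∈ events,
    ((PySem.Dict.mk e).contains "timestamp" = true ∧ (PySem.Dict.mk e).contains "user" = true)
instance (events : List (List (String × Int))) (window : Int) : Decidable (Pre_rolling_unique_users events window) := by unfold Pre_rolling_unique_users; infer_instance

def pvWitness_rolling_unique_users : (List (List (String × Int))) × Int :=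
  ([[("timestamp", 1), ("user", 7)], [("timestamp", 2), ("user", 8)]], 3)

-- On a negative window with two event timestamps t1 < t2 ≤ t1 - window, A's left pointer slides past
-- not-yet-processed events, leaving stray non-zero entries in its count dict, so A reports positive
-- user counts for the (empty) window [T-window+1, T]; B reports the count of that actual window
-- (0 there), which is the intended value.
def D_rolling_unique_users (events : List (List (String × Int))) (window : Int) : Prop :=
  ∃ e1 ∈ events, ∃ e2 ∈ events,
    (PySem.Dict.mk e1).getD "timestamp" 0 < (PySem.Dict.mk e2).getD "timestamp" 0 ∧
    (PySem.Dict.mk e2).getD "timestamp" 0 ≤ (PySem.Dict.mk e1).getD "timestamp" 0 - window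
instance (events : List (List (String × Int))) (window : Int) : Decidable (D_rolling_unique_users events window) := by unfold D_rolling_unique_users; infer_instance

def Spec_rolling_unique_users (events : List (List (String × Int))) (window : Int) (out : List (Int × Int)) : Prop := ¬ D_rolling_unique_users events window → out = rolling_unique_users_alt events window
instance (events : List (List (String × Int))) (window : Int) (out : List (Int × Int)) : Decidable (Spec_rolling_unique_users events window out) := by unfold Spec_rolling_unique_users; infer_instance

def pvDiffWitness_rolling_unique_users : (List (List (String × Int))) × Int :=
  ([[("timestamp", 0), ("user", 1)], [("timestamp", 1), ("user", 2)]], -1)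

def pvDiffWitnessOut_rolling_unique_users : (List (Int × Int)) × (List (Int × Int)) :=
  ([(0, 1), (1, 1)], [(0, 0), (1, 0)])

-- ===== CLAIM (what is proved, stated in full; the proofs are below) =====
def Claim_unchanged_rolling_unique_users : Prop := ∀ (events : List (List (String × Int))) (window : Int), Dom_rolling_unique_users events window → Pre_rolling_unique_users events window → Spec_rolling_unique_users events window (rolling_unique_users events window)
def Claim_changed_rolling_unique_users : Prop := Dom_rolling_unique_users (pvDiffWitness_rolling_unique_users.1) (pvDiffWitness_rolling_unique_users.2) ∧ Pre_rolling_unique_users (pvDiffWitness_rolling_unique_users.1) (pvDiffWitness_rolling_unique_users.2) ∧ D_rolling_unique_users (pvDiffWitness_rolling_unique_users.1) (pvDiffWitness_rolling_unique_users.2) ∧ rolling_unique_users (pvDiffWitness_rolling_unique_users.1) (pvDiffWitness_rolling_unique_users.2) = pvDiffWitnessOut_rolling_unique_users.1 ∧ rolling_unique_users_alt (pvDiffWitness_rolling_unique_users.1) (pvDiffWitness_rolling_unique_users.2) = pvDiffWitnessOut_rolling_unique_users.2 ∧ pvDiffWitnessOut_rolling_unique_users.1 ≠ pvDiffWitnes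sOut_rolling_unique_users.2

-- ===== LEMMAS AND PROOFS =====

-- the dict `user_count` represents the multiset `m` of users currently in the window
def DInv (m : List Int) (uc : PySem.Dict Int Int) : Prop :=
  uc.keys.Nodup ∧ (∀ u : Int, uc.contains u = (m.count u != 0)) ∧
    (∀ u : Int, uc.getD u 0 = (m.count u : Int))

-- erase on a PySem.Dict (no erase lemmas exist in the prelude; proved from its filter definition)
lemma dict_contains_erase (d : PySem.Dict Int Int) (k k' : Int) :
    (d.erase k).contains k' = (decide (k' ≠ k) && d.contains k') := by
  obtain ⟨items⟩ := d
  induction items with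
  | nil => simp [PySem.Dict.erase, PySem.Dict.contains]
  | cons p rest ih =>
    simp only [PySem.Dict.erase, PySem.Dict.contains, List.filter_cons, List.any_cons] at *
    by_cases h1 : p.1 = k <;> by_cases hk : k' = k <;>
      simp_all [beq_iff_eq]
    exact fun h => absurd h.symm hk

lemma dict_get?_erase (d : PySem.Dict Int Int) (k k' : Int) :
    (d.erase k).get? k' = if k' = k then none else d.get? k' := by
  obtain ⟨items⟩ := d
  induction items with
  | nil => simp [PySem.Dict.erase, PySem.Dict.get?]
  | cons p rest ih =>
    simp only [PySem.Dict.erase, PySem.Dict.get?, List.filter_cons] at *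
    by_cases h1 : p.1 = k <;> by_cases hk : k' = k <;> by_cases h2 : p.1 = k' <;>
      simp_all [List.find?_cons, beq_iff_eq]

lemma dict_nodup_keys_erase (d : PySem.Dict Int Int) (k : Int) (h : d.keys.Nodup) :
    (d.erase k).keys.Nodup := by
  obtain ⟨items⟩ := d
  simp only [PySem.Dict.erase, PySem.Dict.keys] at *
  induction items with
  | nil => simp
  | cons p rest ih =>
    simp only [List.filter_cons] at *
    obtain ⟨hp, hrest⟩ := List.nodup_cons.1 h
    split_ifs with h1
    · simp only [List.map_cons, List.nodup_cons]
      refine ⟨fun hm => hp ?_, ih hrest⟩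
      obtain ⟨q, hq, hq2⟩ := List.mem_map.1 hm
      exact List.mem_map.2 ⟨q, (List.mem_filter.1 hq).1, hq2⟩
    · exact ih hrest

lemma dinv_empty : DInv [] PySem.Dict.empty := by
  refine ⟨by simp [PySem.Dict.keys_empty], fun u => ?_, fun u => ?_⟩
  · simp [PySem.Dict.contains_empty]
  · simp [PySem.Dict.getD_eq_get?_getD, PySem.Dict.get?_empty]

lemma dinv_inc (m : List Int) (uc : PySem.Dict Int Int) (u : Int) (h : DInv m uc) :
    DInv (m ++ [u]) (uc.modify u 0 (· + 1)) := by
  obtain ⟨hnd, hc, hg⟩ := h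
  refine ⟨?_, fun v => ?_, fun v => ?_⟩
  · rw [PySem.Dict.keys_modify]
    exact PySem.Dict.nodup_keys_insert _ _ _ hnd
  · rw [PySem.Dict.contains_modify]
    by_cases hv : v = u
    · simp [hv, List.count_append]
    · simp [hv, hc v, List.count_append, List.count_cons, Ne.symm hv]
  · rw [PySem.Dict.getD_modify]
    by_cases hv : v = u
    · simp [hv, hg, List.count_append]
    · simp [hv, hg, List.count_append, List.count_cons, Ne.symm hv]

lemma dinv_dec (m : List Int) (uc : PySem.Dict Int Int) (u : Int) (h : DInv (u :: m) uc) :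
    DInv m (let uc1 := uc.modify u 0 (· - 1);
            if uc1.getD u 0 = 0 then uc1.erase u else uc1) := by
  obtain ⟨hnd, hc, hg⟩ := h
  have hnd1 : (uc.modify u 0 (· - 1)).keys.Nodup := by
    rw [PySem.Dict.keys_modify]; exact PySem.Dict.nodup_keys_insert _ _ _ hnd
  have hg1 : ∀ v : Int, (uc.modify u 0 (· - 1)).getD v 0 = (m.count v : Int) := by
    intro v
    rw [PySem.Dict.getD_modify]
    by_cases hv : v = u
    · simp [hv, hg, List.count_cons]
    · simp [hv, hg, List.count_cons, Ne.symm hv]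
  have hc1 : ∀ v : Int, (uc.modify u 0 (· - 1)).contains v = (v == u || (m.count v != 0)) := by
    intro v
    rw [PySem.Dict.contains_modify, hc v]
    by_cases hv : v = u
    · simp [hv, List.count_cons]
    · simp [hv, List.count_cons, Ne.symm hv]
  simp only []
  split_ifs with h0
  · -- count m u = 0 : the entry is erased
    have hcnt : m.count u = 0 := by
      have := hg1 u; rw [h0] at this; exact_mod_cast this.symm
    refine ⟨dict_nodup_keys_erase _ _ hnd1, fun v => ?_, fun v => ?_⟩
    · rw [dict_contains_erase]
      by_cases hv : v = u
      · simp [hv, hcnt]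
      · simp [hv, hc1 v]
    · rw [PySem.Dict.getD_eq_get?_getD, dict_get?_erase]
      by_cases hv : v = u
      · simp [hv, hcnt]
      · rw [if_neg hv, ← PySem.Dict.getD_eq_get?_getD]; exact hg1 v
  · -- count m u > 0 : the entry stays
    refine ⟨hnd1, fun v => ?_, fun v => ?_⟩
    · rw [hc1 v]
      by_cases hv : v = u
      · rw [hv]; simp; intro hz; exact h0 (by rw [hg1 u, hz]; simp)
      · simp [hv]
    · exact hg1 v

lemma dinv_size (m : List Int) (uc : PySem.Dict Int Int) (h : DInv m uc) :
    uc.size = (PySem.Set.ofList m).length := by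
  obtain ⟨hnd, hc, hg⟩ := h
  have hk : uc.size = uc.keys.length := by
    simp [PySem.Dict.size, PySem.Dict.keys]
  rw [hk]
  refine List.Perm.length_eq ?_
  refine (List.perm_ext_iff_of_nodup hnd (PySem.Set.nodup_ofList m)).2 (fun v => ?_)
  rw [PySem.Set.mem_ofList]
  constructor
  · intro hv
    have := (PySem.Dict.contains_iff_mem_keys uc v).2 hv
    rw [hc v] at this
    simp at this
    exact List.count_pos_iff.1 (Nat.pos_of_ne_zero this)
  · intro hv
    refine (PySem.Dict.contains_iff_mem_keys uc v).1 ?_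
    rw [hc v]
    have := List.count_pos_iff.2 hv
    simp
    omega

lemma rollGroup_eq (s : List (List (String × Int))) (T : Int) :
    ∀ (fuel i : Nat) (uc : PySem.Dict Int Int), s.length - i ≤ fuel →
      rollGroup s T fuel i uc =
        (i + ((s.drop i).takeWhile (fun e => decide (pvTs e = T))).length,
         ((s.drop i).takeWhile (fun e => decide (pvTs e = T))).foldl
           (fun d e => d.modify (pvUser e) 0 (· + 1)) uc) := by
  intro fuel
  induction fuel with
  | zero =>
    intro i uc hf
    have : s.length ≤ i := by omega
    rw [List.drop_eq_nil_of_le this]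
    simp [rollGroup]
  | succ fuel ih =>
    intro i uc hf
    cases hsi : s[i]? with
    | none =>
      have hle : s.length ≤ i := by
        by_contra hlt
        push_neg at hlt
        rw [List.getElem?_eq_getElem hlt] at hsi; cases hsi
      rw [List.drop_eq_nil_of_le hle]
      simp [rollGroup, hsi]
    | some e =>
      have hi : i < s.length := by
        by_contra hlt
        rw [List.getElem?_eq_none (by omega)] at hsi; cases hsi
      have he : s[i] = e := by
        have h2 := List.getElem?_eq_some_iff.1 hsi
        exact h2.choose_spec
      have hdrop : s.drop i = e :: s.drop (i + 1) := by
        rw [List.drop_eq_getElem_cons hi, he]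
      rw [hdrop]
      by_cases ht : pvTs e = T
      · rw [List.takeWhile_cons_of_pos (by simp [ht])]
        simp only [rollGroup, hsi, if_pos ht]
        rw [ih (i + 1) _ (by omega)]
        simp only [List.length_cons, List.foldl_cons]
        rw [Prod.mk.injEq]
        refine ⟨by omega, rfl⟩
      · rw [List.takeWhile_cons_of_neg (by simp [ht])]
        simp [rollGroup, hsi, ht]

lemma rollSlide_eq (s : List (List (String × Int))) (lim : Int) :
    ∀ (fuel l : Nat) (uc : PySem.Dict Int Int), s.length - l ≤ fuel →
      rollSlide s lim fuel l uc =
        (l + ((s.drop l).takeWhile (fun e => decide (pvTs e < lim))).length,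
         ((s.drop l).takeWhile (fun e => decide (pvTs e < lim))).foldl
           (fun d e =>
             let u := pvUser e
             let uc1 := d.modify u 0 (· - 1)
             if uc1.getD u 0 = 0 then uc1.erase u else uc1) uc) := by
  intro fuel
  induction fuel with
  | zero =>
    intro l uc hf
    have hle : s.length ≤ l := by omega
    rw [List.drop_eq_nil_of_le hle]
    simp [rollSlide]
  | succ fuel ih =>
    intro l uc hf
    cases hsi : s[l]? with
    | none =>
      have hle : s.length ≤ l := by
        by_contra hlt
        push_neg at hlt
        rw [List.getElem?_eq_getElem hlt] at hsi; cases hsi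
      rw [List.drop_eq_nil_of_le hle]
      simp [rollSlide, hsi]
    | some e =>
      have hi : l < s.length := by
        by_contra hlt
        rw [List.getElem?_eq_none (by omega)] at hsi; cases hsi
      have he : s[l] = e := by
        have h2 := List.getElem?_eq_some_iff.1 hsi
        exact h2.choose_spec
      have hdrop : s.drop l = e :: s.drop (l + 1) := by
        rw [List.drop_eq_getElem_cons hi, he]
      rw [hdrop]
      by_cases ht : pvTs e < lim
      · rw [List.takeWhile_cons_of_pos (by simp [ht])]
        simp only [rollSlide, hsi, if_pos ht]
        rw [ih (l + 1) _ (by omega)]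
        simp only [List.length_cons, List.foldl_cons]
        rw [Prod.mk.injEq]
        refine ⟨by omega, rfl⟩
      · rw [List.takeWhile_cons_of_neg (by simp [ht])]
        simp [rollSlide, hsi, ht]

lemma dinv_foldl_inc (xs : List (List (String × Int))) :
    ∀ (m : List Int) (uc : PySem.Dict Int Int), DInv m uc →
      DInv (m ++ xs.map pvUser)
        (xs.foldl (fun d e => d.modify (pvUser e) 0 (· + 1)) uc) := by
  induction xs with
  | nil => intro m uc h; simpa using h
  | cons e rest ih =>
    intro m uc h
    have h1 := dinv_inc m uc (pvUser e) h
    have h2 := ih (m ++ [pvUser e]) _ h1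
    simpa [List.append_assoc] using h2

lemma dinv_foldl_dec (xs : List (List (String × Int))) :
    ∀ (m : List Int) (uc : PySem.Dict Int Int), DInv (xs.map pvUser ++ m) uc →
      DInv m
        (xs.foldl (fun d e =>
          let u := pvUser e
          let uc1 := d.modify u 0 (· - 1)
          if uc1.getD u 0 = 0 then uc1.erase u else uc1) uc) := by
  induction xs with
  | nil => intro m uc h; simpa using h
  | cons e rest ih =>
    intro m uc h
    have h1 : DInv (pvUser e :: (rest.map pvUser ++ m)) uc := by simpa using h
    have h2 := dinv_dec _ uc (pvUser e) h1
    exact ih m _ h2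

lemma ofList_append_const (xs ys : List Int) (c : Int) (hc : c ∉ xs)
    (hys : ys ≠ [] ∧ ∀ y ∈ ys, y = c) :
    PySem.Set.ofList (xs ++ ys) = PySem.Set.ofList xs ++ [c] := by
  obtain ⟨hne, hall⟩ := hys
  rw [PySem.Set.ofList_eq_foldl, List.foldl_append, ← PySem.Set.ofList_eq_foldl]
  obtain ⟨y, ys', rfl⟩ := List.exists_cons_of_ne_nil hne
  have hy : y = c := hall y (by simp)
  subst hy
  rw [List.foldl_cons]
  have hstep : PySem.Set.add (PySem.Set.ofList xs) y = PySem.Set.ofList xs ++ [y] := by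
    unfold PySem.Set.add
    rw [if_neg]
    intro hcon
    exact hc ((PySem.Set.mem_ofList xs y).1 ((PySem.Set.contains_iff _ y).1 hcon))
  rw [hstep]
  have hrest : ∀ (zs : List Int), (∀ z ∈ zs, z = y) →
      zs.foldl PySem.Set.add (PySem.Set.ofList xs ++ [y]) = PySem.Set.ofList xs ++ [y] := by
    intro zs
    induction zs with
    | nil => intro _; simp
    | cons z zs' ihz =>
      intro hz
      rw [List.foldl_cons, PySem.Set.add_of_mem (by simp [hz z (by simp)])]
      exact ihz (fun z' hz' => hz z' (by simp [hz']))
  exact hrest ys' (fun z hz => hall z (by simp [hz]))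

-- takeWhile blocks at an offset: value, bounds, membership, stop element
lemma tw_take {α : Type} (s : List α) (p : α → Bool) (a : Nat) :
    (s.take (a + ((s.drop a).takeWhile p).length)).drop a = (s.drop a).takeWhile p := by
  rw [List.drop_take, Nat.add_sub_cancel_left]
  exact ((List.prefix_iff_eq_take.1 (List.takeWhile_prefix p))).symm

lemma tw_len {α : Type} (s : List α) (p : α → Bool) (a : Nat) :
    a + ((s.drop a).takeWhile p).length ≤ s.length ∨ s.length ≤ a := by
  rcases Nat.le_total s.length a with h | h
  · exact Or.inr h
  · left
    have h1 : ((s.drop a).takeWhile p).length ≤ (s.drop a).length :=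
      (List.takeWhile_prefix p).length_le
    rw [List.length_drop] at h1
    omega

lemma tw_mem_idx {α : Type} (s : List α) (p : α → Bool) (a j : Nat)
    (h1 : a ≤ j) (h2 : j < a + ((s.drop a).takeWhile p).length) :
    ∃ hj : j < s.length, p (s[j]'hj) = true := by
  have hk : ((s.drop a).takeWhile p).length ≤ (s.drop a).length :=
    (List.takeWhile_prefix p).length_le
  rw [List.length_drop] at hk
  have hj : j < s.length := by omega
  refine ⟨hj, ?_⟩
  have e1 : (s.drop a).takeWhile p = (s.drop a).take ((s.drop a).takeWhile p).length :=
    List.prefix_iff_eq_take.1 (List.takeWhile_prefix p)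
  have hjm : j - a < ((s.drop a).take ((s.drop a).takeWhile p).length).length := by
    simp only [List.length_take, List.length_drop]
    omega
  have hmem' := List.getElem_mem hjm
  have hval : ((s.drop a).take ((s.drop a).takeWhile p).length)[j - a]'hjm = s[j]'hj := by
    rw [List.getElem_take, List.getElem_drop]
    congr 1; omega
  rw [hval] at hmem'
  rw [← e1] at hmem'
  exact List.mem_takeWhile_imp hmem'

lemma tw_stop {α : Type} (s : List α) (p : α → Bool) (a : Nat)
    (h : a + ((s.drop a).takeWhile p).length < s.length) :
    p (s[a + ((s.drop a).takeWhile p).length]'h) = false := by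
  have hdw : (s.drop a).dropWhile p = s.drop (a + ((s.drop a).takeWhile p).length) := by
    have h1 : (s.drop a).takeWhile p ++ (s.drop a).dropWhile p = s.drop a :=
      List.takeWhile_append_dropWhile
    have h2 : (s.drop a).takeWhile p ++ (s.drop a).drop ((s.drop a).takeWhile p).length
        = s.drop a := by
      conv_rhs => rw [← List.take_append_drop ((s.drop a).takeWhile p).length (s.drop a)]
      rw [← List.prefix_iff_eq_take.1 (List.takeWhile_prefix p)]
    rw [List.drop_drop] at h2
    exact List.append_cancel_left (h1.trans h2.symm)
  have hne : (s.drop a).dropWhile p ≠ [] := by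
    rw [hdw]
    simp only [ne_eq, List.drop_eq_nil_iff]
    omega
  have hne2 : s.drop (a + ((s.drop a).takeWhile p).length) ≠ [] := by
    simp only [ne_eq, List.drop_eq_nil_iff]
    omega
  have hp := List.head_dropWhile_not p hne
  have hhead : ((s.drop a).dropWhile p).head hne = s[a + ((s.drop a).takeWhile p).length]'h := by
    rw [← List.head_drop hne2]
    congr 1
  rw [hhead] at hp
  exact hp

lemma seg_mem_idx {α : Type} (s : List α) (a b : Nat) (x : α)
    (hx : x ∈ (s.take b).drop a) : ∃ j, a ≤ j ∧ j < b ∧ ∃ hj : j < s.length, s[j]'hj = x := by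
  obtain ⟨m, hm, hval⟩ := List.mem_iff_getElem.1 hx
  have hlen : ((s.take b).drop a).length = min b s.length - a := by
    simp [List.length_drop, List.length_take]
  refine ⟨a + m, by omega, by omega, by omega, ?_⟩
  rw [List.getElem_drop, List.getElem_take] at hval
  exact hval

-- B's recorded value at timestamp T
def outVal (s : List (List (String × Int))) (w T : Int) : Int :=
  ((PySem.Set.ofList
      ((s.filter (fun e => decide (T - w + 1 ≤ pvTs e) && decide (pvTs e ≤ T))).map
        pvUser)).length : Int)

-- main loop invariant (s is any list that is index-monotone under pvTs)
lemma rollMain_eq (s : List (List (String × Int))) (w : Int)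
    (hgap : ∀ (p q : Nat) (hp : p < s.length) (hq : q < s.length),
      pvTs (s[p]'hp) < pvTs (s[q]'hq) → pvTs (s[p]'hp) - w < pvTs (s[q]'hq))
    (hsort : ∀ (p q : Nat) (hpq : p ≤ q) (hq : q < s.length),
      pvTs (s[p]'(by omega)) ≤ pvTs (s[q]'hq)) :
    ∀ (fuel i l : Nat) (uc res : PySem.Dict Int Int)
      (hfuel : s.length - i ≤ fuel) (hli : l ≤ i) (hin : i ≤ s.length)
      (hiprev : ∀ (j : Nat) (hj : j < i) (hi : i < s.length),
        pvTs (s[j]'(by omega)) < pvTs (s[i]'hi))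
      (hlprev : ∀ (j : Nat) (hj : j < l) (hi : i < s.length),
        pvTs (s[j]'(by omega)) < pvTs (s[i]'hi) - w + 1)
      (hdinv : DInv (((s.take i).drop l).map pvUser) uc)
      (hres : res.items = (PySem.List.dedup ((s.take i).map pvTs)).map
        (fun T => (T, outVal s w T))),
      (rollMain s w fuel i l uc res).items =
        (PySem.List.dedup (s.map pvTs)).map (fun T => (T, outVal s w T)) := by
  intro fuel
  induction fuel with
  | zero =>
    intro i l uc res hfuel hli hin hiprev hlprev hdinv hres
    have hieq : i = s.length := by omega
    subst hieq
    rw [List.take_length] at hres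
    simpa [rollMain] using hres
  | succ fuel ih =>
    intro i l uc res hfuel hli hin hiprev hlprev hdinv hres
    cases hsi : s[i]? with
    | none =>
      have hle : s.length ≤ i := by
        by_contra hlt
        push_neg at hlt
        rw [List.getElem?_eq_getElem hlt] at hsi; cases hsi
      have hieq : i = s.length := by omega
      subst hieq
      rw [List.take_length] at hres
      simpa [rollMain, hsi] using hres
    | some e =>
      have hi : i < s.length := by
        by_contra hlt
        rw [List.getElem?_eq_none (by omega)] at hsi; cases hsi
      have he : s[i] = e := (List.getElem?_eq_some_iff.1 hsi).choose_spec
      -- notation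
      set T := pvTs e with hT
      set pg : List (String × Int) → Bool := fun e' => decide (pvTs e' = T) with hpg
      set k := ((s.drop i).takeWhile pg).length with hk
      set i2 := i + k with hi2
      set lim := T - w + 1 with hlim
      set ps : List (String × Int) → Bool := fun e' => decide (pvTs e' < lim) with hps
      set k2 := ((s.drop l).takeWhile ps).length with hk2
      set l2 := l + k2 with hl2
      -- block facts
      have hkle : i2 ≤ s.length := by
        rcases tw_len s pg i with h | h
        · omega
        · omega
      have hk1 : 1 ≤ k := by
        have hdrop : s.drop i = e :: s.drop (i + 1) := by
          rw [List.drop_eq_getElem_cons hi, he]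
        rw [hk, hdrop, List.takeWhile_cons_of_pos (by simp [hpg, hT])]
        simp
      have hgmem : ∀ (j : Nat), i ≤ j → j < i2 → ∃ hj : j < s.length,
          pvTs (s[j]'hj) = T := by
        intro j h1 h2
        obtain ⟨hj, hp⟩ := tw_mem_idx s pg i j h1 h2
        exact ⟨hj, by simpa [hpg] using hp⟩
      have hgstop : ∀ (h : i2 < s.length), pvTs (s[i2]'h) ≠ T := by
        intro h
        have := tw_stop s pg i h
        simpa [hpg] using this
      have hle_T : ∀ (j : Nat) (hj : j < s.length), j < i2 → pvTs (s[j]'hj) ≤ T := by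
        intro j hj h2
        rcases Nat.lt_or_ge j i with hji | hji
        · have := hiprev j hji hi
          rw [he] at this
          omega
        · obtain ⟨_, hp⟩ := hgmem j hji h2
          omega
      have hgt_T : ∀ (j : Nat) (hj : j < s.length), i2 ≤ j → T < pvTs (s[j]'hj) := by
        intro j hj hji
        have h2n : i2 < s.length := by omega
        have hmono := hsort i2 j hji hj
        have hTle : T ≤ pvTs (s[i2]'h2n) := by
          have := hsort i i2 (by omega) h2n
          rw [he] at this
          exact this
        have := hgstop h2n
        omega
      -- slide block facts
      have hk2le : l2 ≤ s.length := by
        rcases tw_len s ps l with h | h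
        · omega
        · omega
      have hsmem : ∀ (j : Nat), l ≤ j → j < l2 → ∃ hj : j < s.length,
          pvTs (s[j]'hj) < lim := by
        intro j h1 h2
        obtain ⟨hj, hp⟩ := tw_mem_idx s ps l j h1 h2
        exact ⟨hj, by simpa [hps] using hp⟩
      have hsstop : ∀ (h : l2 < s.length), ¬ pvTs (s[l2]'h) < lim := by
        intro h
        have := tw_stop s ps l h
        simpa [hps] using this
      have hl2i2 : l2 ≤ i2 := by
        by_contra hcon
        push_neg at hcon
        have h1 : i2 < s.length := by omega
        obtain ⟨hj, hp⟩ := hsmem i2 (by omega) hcon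
        have hTlt := hgt_T i2 hj (by omega)
        have hgi := hgap i i2 hi hj (by rw [he]; exact hTlt)
        rw [he] at hgi
        omega
      -- below-lim for everything before l2
      have hbelow : ∀ (j : Nat) (hj : j < s.length), j < l2 → pvTs (s[j]'hj) < lim := by
        intro j hj h2
        rcases Nat.lt_or_ge j l with hjl | hjl
        · have := hlprev j hjl hi
          rw [he] at this
          omega
        · obtain ⟨_, hp⟩ := hsmem j hjl h2
          omega
      -- at-or-above-lim for everything from l2 on
      have habove : ∀ (j : Nat) (hj : j < s.length), l2 ≤ j → lim ≤ pvTs (s[j]'hj) := by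
        intro j hj hji
        have h2n : l2 < s.length := by omega
        have hmono := hsort l2 j hji hj
        have := hsstop h2n
        omega
      -- segment splits
      have hseg1 : (s.take i2).drop l = ((s.take i).drop l) ++ (s.drop i).takeWhile pg := by
        rw [hi2, List.take_add, List.drop_append_of_le_length (by
          simp only [List.length_take]; omega)]
        rw [List.prefix_iff_eq_take.1 (List.takeWhile_prefix pg), ← hk]
      have hseg2 : (s.take i2).drop l = (s.drop l).takeWhile ps ++ (s.take i2).drop l2 := by
        have h1 : i2 = l2 + (i2 - l2) := by omega
        conv_lhs => rw [h1]
        rw [List.take_add, List.drop_append_of_le_length (by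
          simp only [List.length_take]; omega)]
        have h2 : (s.take l2).drop l = (s.drop l).takeWhile ps := by
          rw [hl2]
          exact tw_take s ps l
        rw [h2, List.drop_take]
      -- unfold one step of the loop
      rw [show rollMain s w (fuel + 1) i l uc res =
        rollMain s w fuel (rollGroup s T (s.length - i) i uc).1
          (rollSlide s lim (s.length - l) l (rollGroup s T (s.length - i) i uc).2).1
          (rollSlide s lim (s.length - l) l (rollGroup s T (s.length - i) i uc).2).2
          (res.insert T
            (((rollSlide s lim (s.length - l) l (rollGroup s T (s.length - i) i uc).2).2.size : Int)))
        from by rw [rollMain, hsi]]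
      rw [rollGroup_eq s T (s.length - i) i uc (le_refl _),
          rollSlide_eq s lim (s.length - l) l _ (le_refl _)]
      simp only []
      -- the dict after the two inner loops
      have hdinv1 : DInv (((s.take i2).drop l).map pvUser)
          (((s.drop i).takeWhile pg).foldl (fun d e' => d.modify (pvUser e') 0 (· + 1)) uc) := by
        rw [hseg1, List.map_append]
        exact dinv_foldl_inc _ _ _ hdinv
      have hdinv2 : DInv (((s.take i2).drop l2).map pvUser)
          (((s.drop l).takeWhile ps).foldl (fun d e' => if (d.modify (pvUser e') 0 (· - 1)).getD (pvUser e') 0 = 0 then (d.modify (pvUser e') 0 (· - 1)).erase (pvUser e') else d.modify (pvUser e') 0 (· - 1))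
            (((s.drop i).takeWhile pg).foldl (fun d e' => d.modify (pvUser e') 0 (· + 1)) uc)) := by
      -- apply dinv_foldl_dec
        refine dinv_foldl_dec _ _ _ ?_
        rw [← List.map_append, ← hseg2]
        exact hdinv1
      -- the filter in outVal T is exactly the final window segment
      have hsplit : s = s.take l2 ++ ((s.take i2).drop l2 ++ s.drop i2) := by
        rw [← List.append_assoc]
        have h1 : (s.take i2).take l2 = s.take l2 := by
          rw [List.take_take, min_eq_left hl2i2]
        rw [← h1, List.take_append_drop, List.take_append_drop]
      have hfilt : s.filter (fun e' => decide (T - w + 1 ≤ pvTs e') && decide (pvTs e' ≤ T))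
          = (s.take i2).drop l2 := by
        conv_lhs => rw [hsplit]
        rw [List.filter_append, List.filter_append]
        have hf1 : (s.take l2).filter
            (fun e' => decide (T - w + 1 ≤ pvTs e') && decide (pvTs e' ≤ T)) = [] := by
          rw [List.filter_eq_nil_iff]
          intro x hx
          obtain ⟨j, _, hjb, hj, hval⟩ := seg_mem_idx s 0 l2 x (by simpa using hx)
          have := hbelow j hj hjb
          rw [hval] at this
          simp only [Bool.and_eq_true, decide_eq_true_eq, not_and]
          intro h1
          omega
        have hf2 : ((s.take i2).drop l2).filter
            (fun e' => decide (T - w + 1 ≤ pvTs e') && decide (pvTs e' ≤ T))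
            = (s.take i2).drop l2 := by
          rw [List.filter_eq_self]
          intro x hx
          obtain ⟨j, hja, hjb, hj, hval⟩ := seg_mem_idx s l2 i2 x hx
          have h1 := habove j hj hja
          have h2 := hle_T j hj hjb
          rw [hval] at h1 h2
          simp only [Bool.and_eq_true, decide_eq_true_eq]
          exact ⟨by omega, h2⟩
        have hf3 : (s.drop i2).filter
            (fun e' => decide (T - w + 1 ≤ pvTs e') && decide (pvTs e' ≤ T)) = [] := by
          rw [List.filter_eq_nil_iff]
          intro x hx
          have hx' : x ∈ (s.take s.length).drop i2 := by rw [List.take_length]; exact hx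
          obtain ⟨j, hja, _, hj, hval⟩ := seg_mem_idx s i2 s.length x hx'
          have := hgt_T j hj hja
          rw [hval] at this
          simp only [Bool.and_eq_true, decide_eq_true_eq, not_and]
          intro h1
          omega
        rw [hf1, hf2, hf3, List.nil_append, List.append_nil]
      -- the recorded value equals outVal
      have hsize : ((((s.drop l).takeWhile ps).foldl (fun d e' => if (d.modify (pvUser e') 0 (· - 1)).getD (pvUser e') 0 = 0 then (d.modify (pvUser e') 0 (· - 1)).erase (pvUser e') else d.modify (pvUser e') 0 (· - 1))
            (((s.drop i).takeWhile pg).foldl (fun d e' => d.modify (pvUser e') 0 (· + 1)) uc)).size : Int)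
          = outVal s w T := by
        rw [dinv_size _ _ hdinv2, outVal, hfilt]
      -- T is fresh in res
      have hTnotin : T ∉ (s.take i).map pvTs := by
        intro hmem
        obtain ⟨x, hx, hxT⟩ := List.mem_map.1 hmem
        obtain ⟨j, _, hjb, hj, hval⟩ := seg_mem_idx s 0 i x (by simpa using hx)
        have := hiprev j hjb hi
        rw [hval, hxT, he] at this
        omega
      have hfresh : res.contains T = false := by
        have hkeys : res.keys = PySem.List.dedup ((s.take i).map pvTs) := by
          simp only [PySem.Dict.keys, hres, List.map_map]
          simp [Function.comp_def]
        cases hc : res.contains T with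
        | false => rfl
        | true =>
          exfalso
          have hmem := (PySem.Dict.contains_iff_mem_keys res T).1 hc
          rw [hkeys, PySem.List.dedup_eq_ofList, PySem.Set.mem_ofList] at hmem
          exact hTnotin hmem
      -- dedup extends by [T]
      have htk : s.take i2 = s.take i ++ (s.drop i).takeWhile pg := by
        rw [hi2, List.take_add]
        congr 1
        rw [hk]
        exact (List.prefix_iff_eq_take.1 (List.takeWhile_prefix pg)).symm
      have hded : PySem.List.dedup ((s.take i2).map pvTs)
          = PySem.List.dedup ((s.take i).map pvTs) ++ [T] := by
        rw [htk, List.map_append, PySem.List.dedup_eq_ofList, PySem.List.dedup_eq_ofList]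
        refine ofList_append_const _ _ T hTnotin ⟨?_, ?_⟩
        · have hne : (s.drop i).takeWhile pg ≠ [] := by
            intro hnil
            rw [hk, hnil] at hk1
            simp at hk1
          simpa using hne
        · intro y hy
          obtain ⟨b, hb, hbT⟩ := List.mem_map.1 hy
          have := List.mem_takeWhile_imp hb
          rw [hpg] at this
          simp at this
          rw [← hbT, this]
      -- apply the induction hypothesis
      refine ih i2 l2 _ _ (by omega) hl2i2 hkle ?_ ?_ hdinv2 ?_
      · intro j hj hi2n
        have h1 := hle_T j (by omega) hj
        have h2 := hgt_T i2 hi2n (le_refl _)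
        omega
      · intro j hj hi2n
        have h1 := hbelow j (by omega) hj
        have h2 : T ≤ pvTs (s[i2]'hi2n) := le_of_lt (hgt_T i2 hi2n (le_refl _))
        omega
      · rw [PySem.Dict.items_insert_of_not_contains _ _ hfresh, hres, hded, hsize]
        rw [List.map_append]
        rfl

-- ===== VERDICT (by name: the statement is the Claim_ definition above) =====
theorem rolling_unique_users_spec : Claim_unchanged_rolling_unique_users := by
  intro events window hdom hpre hnd
  unfold rolling_unique_users rolling_unique_users_alt
  by_cases hev : events = []
  · simp [hev]
  · rw [if_neg hev, if_neg hev]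
    have hsort : ∀ (p q : Nat) (hpq : p ≤ q)
        (hq : q < (PySem.List.sorted events (fun e => pvTs e)).length),
        pvTs ((PySem.List.sorted events (fun e => pvTs e))[p]'(by omega)) ≤
          pvTs ((PySem.List.sorted events (fun e => pvTs e))[q]'hq) := by
      intro p q hpq hq
      exact PySem.List.key_sorted_getElem_mono events (fun e => pvTs e) hpq hq
    have hgap : ∀ (p q : Nat) (hp : p < (PySem.List.sorted events (fun e => pvTs e)).length)
        (hq : q < (PySem.List.sorted events (fun e => pvTs e)).length),
        pvTs ((PySem.List.sorted events (fun e => pvTs e))[p]'hp) <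
          pvTs ((PySem.List.sorted events (fun e => pvTs e))[q]'hq) →
        pvTs ((PySem.List.sorted events (fun e => pvTs e))[p]'hp) - window <
          pvTs ((PySem.List.sorted events (fun e => pvTs e))[q]'hq) := by
      intro p q hp hq hlt
      by_contra hcon
      push_neg at hcon
      refine hnd ⟨(PySem.List.sorted events (fun e => pvTs e))[p]'hp, ?_,
        (PySem.List.sorted events (fun e => pvTs e))[q]'hq, ?_, hlt,
        by change pvTs _ ≤ pvTs _ - window; omega⟩
      · exact (PySem.List.mem_sorted events (fun e => pvTs e) false _).1 (List.getElem_mem hp)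
      · exact (PySem.List.mem_sorted events (fun e => pvTs e) false _).1 (List.getElem_mem hq)
    have hmain := rollMain_eq (PySem.List.sorted events (fun e => pvTs e)) window hgap hsort
      (PySem.List.sorted events (fun e => pvTs e)).length 0 0 PySem.Dict.empty PySem.Dict.empty
      (by omega) (le_refl 0) (Nat.zero_le _)
      (fun j hj _ => absurd hj (Nat.not_lt_zero j))
      (fun j hj _ => absurd hj (Nat.not_lt_zero j))
      (by simpa using dinv_empty)
      (by simp [PySem.Dict.empty, PySem.List.dedup_eq_ofList, PySem.Set.ofList])
    simpa [outVal] using hmain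

theorem rolling_unique_users_changed : Claim_changed_rolling_unique_users := by
  unfold Claim_changed_rolling_unique_users
  decide
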